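-- pv_equiv track=rewrite | github.com/wangyibin/CPhasing | cphasing/evaluator/scaffoldeval.py | infer_group_alias_by_overlap
-- ===== SOURCE A (Python) =====
-- def _normalize_group_name(s: str) -> str:
--     if s is None:
--         return ""
--     x = str(s).strip()
--     x = x.replace("|", "_")
--     x_low = x.lower()
--     for pref in (
--         "chr",
--         "chromosome_",
--         "chromosome",
--         "scaffold_",
--         "scaf_",
--         "ctg_",
--         "contig_",
--     ):
--         if x_low.startswith(pref):
--             x = x[len(pref) :]
--             x_low = x_low[len(pref) :]
--             break
--
--     x = x.lstrip("0")
--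
--     if x_low in ("mt", "m", "mitochondria"):
--         return "MT"
--     if x_low in ("x", "y"):
--         return x.upper()
--     return x
--
-- def _build_contig_group_map(paths, normalize=True):
--     """
--     paths: dict[group_name -> [contig_with_strand,...]]
--     return: dict[contig_id -> group_name]
--     """
--     m = {}
--     for chrom, lst in paths.items():
--         g = _normalize_group_name(chrom) if normalize else chrom
--         for c in lst:
--             cid = c[:-1]
--             m[cid] = g
--     return m
--
-- def infer_group_alias_by_overlap(truth_paths, test_paths, normalize=True):
--     tmap = _build_contig_group_map(truth_paths, normalize=normalize)
--     pmap = _build_contig_group_map(test_paths, normalize=normalize)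
--
--     counts = {}  # truth_g -> {test_g: n}
--     common = set(tmap.keys()) & set(pmap.keys())
--     for cid in common:
--         tg = tmap[cid]
--         pg = pmap[cid]
--         d = counts.setdefault(tg, {})
--         d[pg] = d.get(pg, 0) + 1
--
--     alias = {}
--     for tg, d in counts.items():
--         pg = max(d.items(), key=lambda kv: (kv[1], kv[0]))[0]
--         alias[tg] = pg
--     return alias
-- ===== SOURCE B (Python) =====
-- def _normalize_group_name(s: str) -> str:
--     if s is None:
--         return ""
--     x = str(s).strip()
--     x = x.replace("|", "_")
--     x_low = x.lower()
--     for pref in (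
--         "chr",
--         "chromosome_",
--         "chromosome",
--         "scaffold_",
--         "scaf_",
--         "ctg_",
--         "contig_",
--     ):
--         if x_low.startswith(pref):
--             x = x[len(pref) :]
--             x_low = x_low[len(pref) :]
--             break
--
--     x = x.lstrip("0")
--
--     if x_low in ("mt", "m", "mitochondria"):
--         return "MT"
--     if x_low in ("x", "y"):
--         return x.upper()
--     return x
--
-- def _build_contig_group_map(paths, normalize=True):
--     m = {}
--     for chrom, lst in paths.items():
--         g = _normalize_group_name(chrom) if normalize else chrom
--         for c in lst:
--             cid = c[:-1]
--             m[cid] = g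
--     return m
--
-- def infer_group_alias_by_overlap(truth_paths, test_paths, normalize=True):
--     tmap = _build_contig_group_map(truth_paths, normalize=normalize)
--     pmap = _build_contig_group_map(test_paths, normalize=normalize)
--
--     # single fused pass: maintain per-truth-group counts AND the running
--     # best (count, test_group) tuple; no separate final argmax loop.
--     counts = {}
--     best = {}  # truth_g -> (n, test_g), the current lexicographic maximum
--     for cid in set(tmap.keys()) & set(pmap.keys()):
--         tg = tmap[cid]
--         pg = pmap[cid]
--         d = counts.setdefault(tg, {})
--         d[pg] = d.get(pg, 0) + 1
--         cand = (d[pg], pg)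
--         if tg not in best or best[tg] < cand:
--             best[tg] = cand
--     return {tg: v[1] for tg, v in best.items()}
-- ===== Notes on version B (the rewrite author's own statement) =====
-- stated objective: alternative
-- what changed: B fuses counting and winner selection into one pass over the common contig ids, maintaining a running (count, test_group) lexicographic maximum per truth group, so A's separate final max()-over-items loop disappears.
import Mathlib
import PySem

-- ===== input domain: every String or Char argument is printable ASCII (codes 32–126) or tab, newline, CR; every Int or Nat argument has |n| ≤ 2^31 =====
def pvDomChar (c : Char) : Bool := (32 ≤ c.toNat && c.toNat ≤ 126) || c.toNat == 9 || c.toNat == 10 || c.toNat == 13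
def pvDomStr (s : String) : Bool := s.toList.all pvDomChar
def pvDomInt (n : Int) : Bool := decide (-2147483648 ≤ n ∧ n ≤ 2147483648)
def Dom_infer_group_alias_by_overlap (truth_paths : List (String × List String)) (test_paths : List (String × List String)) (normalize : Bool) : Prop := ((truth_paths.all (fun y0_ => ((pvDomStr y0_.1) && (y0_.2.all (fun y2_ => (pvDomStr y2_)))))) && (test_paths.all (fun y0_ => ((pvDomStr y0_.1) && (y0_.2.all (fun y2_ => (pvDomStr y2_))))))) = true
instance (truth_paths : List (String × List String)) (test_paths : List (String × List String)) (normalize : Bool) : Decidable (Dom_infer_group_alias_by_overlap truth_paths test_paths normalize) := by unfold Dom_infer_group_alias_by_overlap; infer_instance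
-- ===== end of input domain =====

-- B fuses counting and winner selection into one pass, maintaining a running (count, test_group)
-- lexicographic maximum per truth group, so A's separate final max()-over-items loop disappears
-- (objective: alternative, same asymptotic cost). Proved: identical return values on all inputs.
-- The Python builds the counts/alias dicts by iterating a set; dict outputs are compared ignoring
-- order, and the returned VALUES are iteration-order independent (counts, and a max over distinct
-- (count, name) keys); the ports iterate the PySem.Set (first-insertion) order.

-- ===== PORT A =====
-- shared helpers: _normalize_group_name and _build_contig_group_map are textually identical in
-- both Pythons, so one Lean transliteration serves both ports.

-- the prefix-stripping for-loop with break (first matching prefix strips from x and x_low)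
def pvStripPref : List (List Char) → List Char → List Char → (List Char × List Char)
  | [], x, xlow => (x, xlow)
  | p :: ps, x, xlow =>
      if PySem.Chars.startswith xlow p then (x.drop p.length, xlow.drop p.length)
      else pvStripPref ps x xlow

-- _normalize_group_name (s is a str here, never None)
def pvNormName (s : String) : String :=
  let x := PySem.Chars.strip s.toList
  let x := PySem.Chars.replace x ['|'] ['_']
  let xlow := PySem.Chars.lower x
  let r := pvStripPref ["chr".toList, "chromosome_".toList, "chromosome".toList,
                        "scaffold_".toList, "scaf_".toList, "ctg_".toList, "contig_".toList] x xlow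
  let x := r.1
  let xlow := r.2
  let x := x.dropWhile (· == '0')  -- x.lstrip("0"): exact, the strip set is the single char '0'
  if xlow == "mt".toList || xlow == "m".toList || xlow == "mitochondria".toList then "MT"
  else if xlow == "x".toList || xlow == "y".toList then String.ofList (PySem.Chars.upper x)
  else String.ofList x

-- _build_contig_group_map
def pvBuildMap (paths : List (String × List String)) (normalize : Bool) : PySem.Dict String String :=
  paths.foldl (fun m p =>
    let g := if normalize then pvNormName p.1 else p.1
    p.2.foldl (fun m c => m.insert (PySem.Str.slice c none (some (-1))) g) m) PySem.Dict.empty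

-- A's counting-loop body: d = counts.setdefault(tg, {}); d[pg] = d.get(pg, 0) + 1
-- (cid is always a key of tmap and pmap, so tmap[cid]/pmap[cid] cannot raise; getD's default is unreachable)
def pvStepA (tmap pmap : PySem.Dict String String)
    (counts : PySem.Dict String (PySem.Dict String Int)) (cid : String) :
    PySem.Dict String (PySem.Dict String Int) :=
  let tg := tmap.getD cid ""
  let pg := pmap.getD cid ""
  let d := counts.getD tg PySem.Dict.empty
  counts.insert tg (d.insert pg (d.getD pg 0 + 1))

-- max(d.items(), key=lambda kv: (kv[1], kv[0]))[0]  — tuple key, so max2?;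
-- d is never empty (every entry of counts got at least one increment), so getD's default is unreachable
def pvArgmax (d : PySem.Dict String Int) : String :=
  ((PySem.List.max2? d.items (fun kv => kv.2) (fun kv => kv.1)).map (·.1)).getD ""

def infer_group_alias_by_overlap (truth_paths : List (String × List String)) (test_paths : List (String × List String)) (normalize : Bool) : List (String × String) :=
  let tmap := pvBuildMap truth_paths normalize
  let pmap := pvBuildMap test_paths normalize
  let common := PySem.Set.inter (PySem.Set.ofList tmap.keys) (PySem.Set.ofList pmap.keys)
  let counts := common.foldl (pvStepA tmap pmap) PySem.Dict.empty
  let al := counts.items.foldl (fun al p => al.insert p.1 (pvArgmax p.2)) PySem.Dict.empty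
  al.items

-- ===== PORT B =====
-- Python's '<' on an (int, str) tuple: first components, then (on int equality) second components
def pvTupLt (a b : Int × String) : Bool :=
  decide (a.1 < b.1) || (!decide (b.1 < a.1) && decide (a.2 < b.2))

-- B's fused loop body: bump the count, then update the running best (count, test_group) tuple
def pvStepB (tmap pmap : PySem.Dict String String)
    (st : PySem.Dict String (PySem.Dict String Int) × PySem.Dict String (Int × String)) (cid : String) :
    PySem.Dict String (PySem.Dict String Int) × PySem.Dict String (Int × String) :=
  let tg := tmap.getD cid ""
  let pg := pmap.getD cid ""
  let d := st.1.getD tg PySem.Dict.empty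
  let d' := d.insert pg (d.getD pg 0 + 1)
  let cand := (d'.getD pg 0, pg)
  let best' := match st.2.get? tg with
    | none => st.2.insert tg cand
    | some b => if pvTupLt b cand then st.2.insert tg cand else st.2
  (st.1.insert tg d', best')

def infer_group_alias_by_overlap_alt (truth_paths : List (String × List String)) (test_paths : List (String × List String)) (normalize : Bool) : List (String × String) :=
  let tmap := pvBuildMap truth_paths normalize
  let pmap := pvBuildMap test_paths normalize
  let common := PySem.Set.inter (PySem.Set.ofList tmap.keys) (PySem.Set.ofList pmap.keys)
  let st := common.foldl (pvStepB tmap pmap) (PySem.Dict.empty, PySem.Dict.empty)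
  (st.2.items.map (fun p => (p.1, p.2.2)))

-- ===== PRECONDITION & SPEC =====
def Spec_infer_group_alias_by_overlap (truth_paths : List (String × List String)) (test_paths : List (String × List String)) (normalize : Bool) (out : List (String × String)) : Prop := out = infer_group_alias_by_overlap_alt truth_paths test_paths normalize
instance (truth_paths : List (String × List String)) (test_paths : List (String × List String)) (normalize : Bool) (out : List (String × String)) : Decidable (Spec_infer_group_alias_by_overlap truth_paths test_paths normalize out) := by unfold Spec_infer_group_alias_by_overlap; infer_instance

-- ===== CLAIM (what is proved, stated in full; the proofs are below) =====
def Claim_equal_infer_group_alias_by_overlap : Prop := ∀ (truth_paths : List (String × List String)) (test_paths : List (String × List String)) (normalize : Bool), Dom_infer_group_alias_by_overlap truth_paths test_paths normalize → Spec_infer_group_alias_by_overlap truth_paths test_paths normalize (infer_group_alias_by_overlap truth_paths test_paths normalize)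

-- ===== LEMMAS AND PROOFS =====

-- strict lexicographic order on (count, name) tuples, as a Prop
def LtLex (a b : Int × String) : Prop := a.1 < b.1 ∨ (a.1 = b.1 ∧ a.2 < b.2)

lemma lexBool_iff (i j : Int) (s t : String) :
    (decide (i < j) || (!decide (j < i) && decide (s < t))) = true ↔ LtLex (i, s) (j, t) := by
  unfold LtLex
  by_cases hij : i < j
  · simp [hij]
  · simp only [hij, decide_false, Bool.false_or, Bool.and_eq_true, Bool.not_eq_true',
      decide_eq_false_iff_not, decide_eq_true_eq]
    constructor
    · rintro ⟨h1, h2⟩; exact Or.inr ⟨by omega, h2⟩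
    · rintro (h | ⟨h1, h2⟩)
      · exact h.elim
      · exact ⟨by omega, h2⟩

lemma pvTupLt_iff (a b : Int × String) : pvTupLt a b = true ↔ LtLex a b := lexBool_iff a.1 b.1 a.2 b.2

lemma ltLex_irrefl (a : Int × String) : ¬ LtLex a a := by
  unfold LtLex; rintro (h | ⟨_, h⟩) <;> exact lt_irrefl _ h

lemma ltLex_trans {a b c : Int × String} (h1 : LtLex a b) (h2 : LtLex b c) : LtLex a c := by
  unfold LtLex at *
  rcases h1 with h1 | ⟨h1, h1'⟩ <;> rcases h2 with h2 | ⟨h2, h2'⟩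
  · exact Or.inl (lt_trans h1 h2)
  · exact Or.inl (by omega)
  · exact Or.inl (by omega)
  · exact Or.inr ⟨by omega, lt_trans h1' h2'⟩

lemma ltLex_antisymm {a b : Int × String} (h1 : ¬ LtLex a b) (h2 : ¬ LtLex b a) : a = b := by
  unfold LtLex at *
  have hi : a.1 = b.1 := by omega
  have hs : a.2 = b.2 := by
    have n1 : ¬ a.2 < b.2 := fun hl => h1 (Or.inr ⟨hi, hl⟩)
    have n2 : ¬ b.2 < a.2 := fun hl => h2 (Or.inr ⟨hi.symm, hl⟩)
    exact le_antisymm (le_of_not_gt n2) (le_of_not_gt n1)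
  exact Prod.ext hi hs

-- m is the lexicographic maximum of the (count, name) tuples of d's items
def IsLexMax (m : Int × String) (d : PySem.Dict String Int) : Prop :=
  (∃ kv ∈ d.items, (kv.2, kv.1) = m) ∧ ∀ kv ∈ d.items, ¬ LtLex m (kv.2, kv.1)

-- the loop body of A's max2? fold, with the tuple key (kv[1], kv[0]) instantiated
def pvMaxStep (acc : Option (String × Int)) (x : String × Int) : Option (String × Int) :=
  match acc with
  | none => some x
  | some m => if (decide (m.2 < x.2) || !decide (x.2 < m.2) && decide (m.1 < x.1)) = true
              then some x else some m

-- A's max2?-fold computes a lexicographic maximum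
lemma max2_go (l : List (String × Int)) (m : String × Int) :
    ∃ r, l.foldl pvMaxStep (some m) = some r ∧
      (r = m ∨ r ∈ l) ∧ ¬ LtLex (r.2, r.1) (m.2, m.1) ∧
      ∀ kv ∈ l, ¬ LtLex (r.2, r.1) (kv.2, kv.1) := by
  induction l generalizing m with
  | nil => exact ⟨m, rfl, Or.inl rfl, ltLex_irrefl _, by simp⟩
  | cons x l ih =>
    have hcond : ((decide (m.2 < x.2) || !decide (x.2 < m.2) && decide (m.1 < x.1)) = true)
        ↔ LtLex (m.2, m.1) (x.2, x.1) := lexBool_iff m.2 x.2 m.1 x.1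
    by_cases hc : LtLex (m.2, m.1) (x.2, x.1)
    · rw [List.foldl_cons, show pvMaxStep (some m) x = some x by
        simp only [pvMaxStep]; rw [if_pos (hcond.2 hc)]]
      obtain ⟨r, hr, hmem, hge, hall⟩ := ih x
      refine ⟨r, hr, ?_, ?_, ?_⟩
      · rcases hmem with h | h
        · exact Or.inr (h ▸ List.mem_cons_self)
        · exact Or.inr (List.mem_cons_of_mem _ h)
      · intro hlt
        exact hge (ltLex_trans hlt hc)
      · intro kv hkv
        rcases List.mem_cons.1 hkv with rfl | hkv
        · exact hge
        · exact hall _ hkv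
    · rw [List.foldl_cons, show pvMaxStep (some m) x = some m by
        simp only [pvMaxStep]; rw [if_neg (fun h => hc (hcond.1 h))]]
      obtain ⟨r, hr, hmem, hge, hall⟩ := ih m
      refine ⟨r, hr, ?_, hge, ?_⟩
      · rcases hmem with h | h
        · exact Or.inl h
        · exact Or.inr (List.mem_cons_of_mem _ h)
      · intro kv hkv
        rcases List.mem_cons.1 hkv with rfl | hkv
        · -- kv = x: r is ≥ m and m is not < x, so r is not < x
          intro hlt
          by_cases hxm : LtLex (kv.2, kv.1) (m.2, m.1)
          · exact hge (ltLex_trans hlt hxm)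
          · exact hge ((ltLex_antisymm hxm hc) ▸ hlt)
        · exact hall _ hkv

-- A's library max2? call, peeled to the pvMaxStep fold over the tail
lemma max2_cons (h0 : String × Int) (t : List (String × Int)) :
    PySem.List.max2? (h0 :: t) (fun kv => kv.2) (fun kv => kv.1) = t.foldl pvMaxStep (some h0) := by
  unfold PySem.List.max2? pvMaxStep
  rw [List.foldl_cons]
  beta_reduce
  congr 1
  ext acc x
  cases acc <;> rfl

lemma pvArgmax_of_isLexMax (d : PySem.Dict String Int) (m : Int × String) (hm : IsLexMax m d) :
    pvArgmax d = m.2 := by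
  obtain ⟨⟨kv0, hkv0, hkveq⟩, hdom⟩ := hm
  rcases hitems : d.items with _ | ⟨h0, t⟩
  · rw [hitems] at hkv0; cases hkv0
  obtain ⟨r, hr, hmem, hge, hall⟩ := max2_go t h0
  unfold pvArgmax
  rw [hitems, max2_cons, hr]
  have hrmem : r ∈ d.items := by
    rw [hitems]
    rcases hmem with h | h
    · exact h ▸ List.mem_cons_self
    · exact List.mem_cons_of_mem _ h
  have hrdom : ∀ kv ∈ d.items, ¬ LtLex (r.2, r.1) (kv.2, kv.1) := by
    intro kv hkv
    rw [hitems] at hkv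
    rcases List.mem_cons.1 hkv with rfl | hkv
    · exact hge
    · exact hall _ hkv
  have h1 : ¬ LtLex m (r.2, r.1) := hdom r hrmem
  have h2 : ¬ LtLex (r.2, r.1) m := hkveq ▸ hrdom kv0 hkv0
  have hrm : (r.2, r.1) = m := ltLex_antisymm h2 h1
  simp [← hrm]

-- the maximum of a freshly created one-entry count dict
lemma isLexMax_singleton (pg : String) (w : Int) :
    IsLexMax ((PySem.Dict.empty.insert pg w).getD pg 0, pg) (PySem.Dict.empty.insert pg w) := by
  have hg : (PySem.Dict.empty.insert pg w).getD pg 0 = w := PySem.Dict.getD_insert_self _ _ _ _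
  constructor
  · exact ⟨(pg, w), PySem.Dict.mem_items_insert_self _ _ _, by rw [hg]⟩
  · intro kv hkv
    rw [PySem.Dict.mem_items_insert] at hkv
    rcases hkv with rfl | ⟨hkv, _⟩
    · rw [hg]; exact ltLex_irrefl _
    · exact absurd hkv (by simp [PySem.Dict.empty])

-- bumping one count preserves (and updates) the lexicographic maximum
lemma isLexMax_step (d : PySem.Dict String Int) (hnd : d.keys.Nodup)
    (m : Int × String) (hm : IsLexMax m d) (pg : String) :
    IsLexMax (if pvTupLt m (d.getD pg 0 + 1, pg) then (d.getD pg 0 + 1, pg) else m)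
      (d.insert pg (d.getD pg 0 + 1)) := by
  obtain ⟨⟨kv0, hkv0, hkveq⟩, hdom⟩ := hm
  constructor
  · -- membership of the new best tuple
    by_cases hlt : pvTupLt m (d.getD pg 0 + 1, pg)
    · rw [if_pos hlt]
      exact ⟨(pg, d.getD pg 0 + 1), PySem.Dict.mem_items_insert_self _ _ _, rfl⟩
    · rw [if_neg hlt]
      have hne : kv0.1 ≠ pg := by
        intro he
        have hmem' : (pg, kv0.2) ∈ d.items := by rw [← he]; exact hkv0
        have hv : d.getD pg 0 = kv0.2 := PySem.Dict.getD_of_mem_items _ hmem' hnd 0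
        apply hlt
        rw [pvTupLt_iff, ← hkveq]
        exact Or.inl (by omega)
      refine ⟨kv0, ?_, hkveq⟩
      rw [PySem.Dict.mem_items_insert]
      exact Or.inr ⟨hkv0, hne⟩
  · -- domination over every item of the updated dict
    intro kv hkv
    rw [PySem.Dict.mem_items_insert] at hkv
    by_cases hlt : pvTupLt m (d.getD pg 0 + 1, pg)
    · rw [if_pos hlt]
      rcases hkv with rfl | ⟨hkv, _⟩
      · exact ltLex_irrefl _
      · intro hcon
        exact hdom kv hkv (ltLex_trans ((pvTupLt_iff _ _).1 hlt) hcon)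
    · rw [if_neg hlt]
      rcases hkv with rfl | ⟨hkv, _⟩
      · exact fun hcon => hlt ((pvTupLt_iff _ _).2 hcon)
      · exact hdom kv hkv

-- the coupling invariant between A's counts dict and B's (counts, best) state
def pvRel (counts : PySem.Dict String (PySem.Dict String Int))
    (best : PySem.Dict String (Int × String)) : Prop :=
  counts.keys.Nodup ∧ best.keys = counts.keys ∧
  ∀ tg d, counts.get? tg = some d →
    d.keys.Nodup ∧ ∃ m, best.get? tg = some m ∧ IsLexMax m d

lemma pvRel_empty : pvRel PySem.Dict.empty PySem.Dict.empty := by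
  refine ⟨by simp, rfl, ?_⟩
  intro tg d h
  simp [PySem.Dict.get?_empty] at h

-- fused-step preserves the invariant
lemma pvRel_step (tmap pmap : PySem.Dict String String)
    (counts : PySem.Dict String (PySem.Dict String Int))
    (best : PySem.Dict String (Int × String)) (cid : String) (h : pvRel counts best) :
    pvRel (pvStepB tmap pmap (counts, best) cid).1 (pvStepB tmap pmap (counts, best) cid).2 := by
  obtain ⟨hnc, hkeys, hall⟩ := h
  simp only [pvStepB]
  set tg := tmap.getD cid "" with htg
  set pg := pmap.getD cid "" with hpg
  rcases hb : best.get? tg with _ | b0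
  · -- tg is new: both dicts append it
    have hmemb : tg ∉ best.keys := (PySem.Dict.get?_eq_none_iff_not_mem_keys _ _).1 hb
    have hmemc : tg ∉ counts.keys := hkeys ▸ hmemb
    have hc0 : counts.get? tg = none := (PySem.Dict.get?_eq_none_iff_not_mem_keys _ _).2 hmemc
    have hd0 : counts.getD tg PySem.Dict.empty = PySem.Dict.empty :=
      PySem.Dict.getD_of_get?_eq_none _ _ hc0
    have hcontc : counts.contains tg = false := by
      rw [PySem.Dict.contains_eq_decide_mem_keys]; simpa using hmemc
    have hcontb : best.contains tg = false := by
      rw [PySem.Dict.contains_eq_decide_mem_keys]; simpa using hmemb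
    change pvRel _ (best.insert tg _)
    refine ⟨PySem.Dict.nodup_keys_insert _ _ _ hnc, ?_, ?_⟩
    · rw [PySem.Dict.keys_insert_of_not_contains _ _ hcontb,
        PySem.Dict.keys_insert_of_not_contains _ _ hcontc, hkeys]
    · intro tg' d'' h''
      by_cases he : tg' = tg
      · subst he
        rw [PySem.Dict.get?_insert_self] at h''
        obtain rfl : (counts.getD tg PySem.Dict.empty).insert pg
            ((counts.getD tg PySem.Dict.empty).getD pg 0 + 1) = d'' := by
          injection h''
        rw [hd0]
        refine ⟨PySem.Dict.nodup_keys_insert _ _ _ (by simp), ?_⟩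
        refine ⟨_, PySem.Dict.get?_insert_self _ _ _, ?_⟩
        exact isLexMax_singleton pg _
      · rw [PySem.Dict.get?_insert_of_ne _ _ he] at h''
        obtain ⟨hnd, m, hm1, hm2⟩ := hall tg' d'' h''
        exact ⟨hnd, m, by rw [PySem.Dict.get?_insert_of_ne _ _ he]; exact hm1, hm2⟩
  · -- tg already present: its count dict gains and the running max is updated
    have hmemb : tg ∈ best.keys := by
      by_contra hn
      rw [(PySem.Dict.get?_eq_none_iff_not_mem_keys _ _).2 hn] at hb
      cases hb
    have hmemc : tg ∈ counts.keys := hkeys ▸ hmemb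
    obtain ⟨d0, hd0⟩ : ∃ d0, counts.get? tg = some d0 := by
      rcases hg : counts.get? tg with _ | d0
      · exact absurd hmemc ((PySem.Dict.get?_eq_none_iff_not_mem_keys _ _).1 hg)
      · exact ⟨d0, rfl⟩
    have hgd : counts.getD tg PySem.Dict.empty = d0 := PySem.Dict.getD_of_get?_eq_some _ _ hd0
    obtain ⟨hnd0, m, hm1, hmax⟩ := hall tg d0 hd0
    obtain rfl : m = b0 := by rw [hm1] at hb; injection hb
    have hcontc : counts.contains tg = true := by
      rw [PySem.Dict.contains_eq_decide_mem_keys]; simpa using hmemc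
    have hcontb : best.contains tg = true := by
      rw [PySem.Dict.contains_eq_decide_mem_keys]; simpa using hmemb
    change pvRel _ (if pvTupLt m _ = true then best.insert tg _ else best)
    have hbestkeys : ∀ (c : Int × String),
        (if pvTupLt m c then best.insert tg c else best).keys = best.keys := by
      intro c
      by_cases hlt : pvTupLt m c
      · rw [if_pos hlt, PySem.Dict.keys_insert_of_contains _ _ hcontb]
      · rw [if_neg hlt]
    refine ⟨PySem.Dict.nodup_keys_insert _ _ _ hnc, ?_, ?_⟩
    · rw [hbestkeys, PySem.Dict.keys_insert_of_contains _ _ hcontc, hkeys]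
    · intro tg' d'' h''
      by_cases he : tg' = tg
      · subst he
        rw [PySem.Dict.get?_insert_self] at h''
        obtain rfl : (counts.getD tg PySem.Dict.empty).insert pg
            ((counts.getD tg PySem.Dict.empty).getD pg 0 + 1) = d'' := by
          injection h''
        rw [hgd]
        have hcand : ((d0.insert pg (d0.getD pg 0 + 1)).getD pg 0, pg) = (d0.getD pg 0 + 1, pg) := by
          rw [PySem.Dict.getD_insert_self]
        refine ⟨PySem.Dict.nodup_keys_insert _ _ _ hnd0, ?_⟩
        refine ⟨if pvTupLt m (d0.getD pg 0 + 1, pg) then (d0.getD pg 0 + 1, pg) else m, ?_, ?_⟩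
        · rw [hcand]
          by_cases hlt : pvTupLt m (d0.getD pg 0 + 1, pg)
          · rw [if_pos hlt, if_pos hlt, PySem.Dict.get?_insert_self]
          · rw [if_neg hlt, if_neg hlt]; exact hm1
        · exact isLexMax_step d0 hnd0 m hmax pg
      · rw [PySem.Dict.get?_insert_of_ne _ _ he] at h''
        obtain ⟨hnd, m', hm1', hm2'⟩ := hall tg' d'' h''
        refine ⟨hnd, m', ?_, hm2'⟩
        rw [hgd]
        by_cases hlt : pvTupLt m ((d0.insert pg (d0.getD pg 0 + 1)).getD pg 0, pg)
        · rw [if_pos hlt, PySem.Dict.get?_insert_of_ne _ _ he]; exact hm1'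
        · rw [if_neg hlt]; exact hm1'

-- B's first state component runs A's counting loop
lemma foldB_fst (tmap pmap : PySem.Dict String String) (cs : List String)
    (c0 : PySem.Dict String (PySem.Dict String Int)) (b0 : PySem.Dict String (Int × String)) :
    (cs.foldl (pvStepB tmap pmap) (c0, b0)).1 = cs.foldl (pvStepA tmap pmap) c0 := by
  induction cs generalizing c0 b0 with
  | nil => rfl
  | cons c cs ih => simpa [pvStepB, pvStepA] using ih _ _

lemma pvRel_fold (tmap pmap : PySem.Dict String String) (cs : List String) :
    pvRel (cs.foldl (pvStepB tmap pmap) (PySem.Dict.empty, PySem.Dict.empty)).1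
        (cs.foldl (pvStepB tmap pmap) (PySem.Dict.empty, PySem.Dict.empty)).2 := by
  suffices h : ∀ st : PySem.Dict String (PySem.Dict String Int) × PySem.Dict String (Int × String),
      pvRel st.1 st.2 → pvRel (cs.foldl (pvStepB tmap pmap) st).1 (cs.foldl (pvStepB tmap pmap) st).2 by
    exact h _ pvRel_empty
  induction cs with
  | nil => intro st h; exact h
  | cons c cs ih =>
    intro st h
    exact ih _ (pvRel_step tmap pmap st.1 st.2 c h)

-- the two result lists agree
lemma final_eq (counts : PySem.Dict String (PySem.Dict String Int))
    (best : PySem.Dict String (Int × String)) (h : pvRel counts best) :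
    (counts.items.foldl (fun al p => al.insert p.1 (pvArgmax p.2)) PySem.Dict.empty).items
      = best.items.map (fun p => (p.1, p.2.2)) := by
  obtain ⟨hnc, hkeys, hall⟩ := h
  have hnb : best.keys.Nodup := hkeys ▸ hnc
  have hfresh := PySem.Dict.items_foldl_insert_fresh (l := counts.items)
    (k := fun p => p.1) (v := fun p => pvArgmax p.2) (d := PySem.Dict.empty)
    (by intro a _; exact PySem.Dict.contains_empty _) (by simpa [PySem.Dict.keys] using hnc)
  rw [hfresh]
  have hmapfst : best.items.map (fun p => p.1) = counts.items.map (fun p => p.1) := by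
    simpa [PySem.Dict.keys] using hkeys
  have hlen : counts.items.length = best.items.length := by
    have := congrArg List.length hmapfst
    simpa using this.symm
  rw [show (PySem.Dict.empty : PySem.Dict String String).items = [] from rfl, List.nil_append]
  apply List.ext_getElem (by simpa using hlen)
  intro i h1 h2
  have h1' : i < counts.items.length := by simpa using h1
  have h2' : i < best.items.length := by simpa using h2
  have hfst : (counts.items[i]'h1').1 = (best.items[i]'h2').1 := by
    have hq := congrArg (fun l => l[i]?) hmapfst
    simp only [List.getElem?_map] at hq
    rw [List.getElem?_eq_getElem h1', List.getElem?_eq_getElem h2'] at hq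
    simpa using (Option.some.inj hq).symm
  have hcmem : counts.items[i]'h1' ∈ counts.items := List.getElem_mem _
  have hbmem : best.items[i]'h2' ∈ best.items := List.getElem_mem _
  have hcget : counts.get? (counts.items[i]'h1').1 = some (counts.items[i]'h1').2 :=
    PySem.Dict.get?_of_mem_items _ hcmem hnc
  have hbget : best.get? (best.items[i]'h2').1 = some (best.items[i]'h2').2 :=
    PySem.Dict.get?_of_mem_items _ hbmem hnb
  obtain ⟨_, m, hm1, hm2⟩ := hall _ _ hcget
  rw [hfst] at hm1
  rw [hm1] at hbget
  have hmval : m = (best.items[i]'h2').2 := Option.some.inj hbget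
  simp only [List.getElem_map]
  rw [pvArgmax_of_isLexMax _ m hm2, hmval, hfst]

-- ===== VERDICT (by name: the statement is the Claim_ definition above) =====
theorem infer_group_alias_by_overlap_spec : Claim_equal_infer_group_alias_by_overlap := by
  intro tp pp nz _
  unfold Spec_infer_group_alias_by_overlap
  simp only [infer_group_alias_by_overlap, infer_group_alias_by_overlap_alt]
  rw [← foldB_fst (pvBuildMap tp nz) (pvBuildMap pp nz) _ PySem.Dict.empty PySem.Dict.empty]
  exact final_eq _ _ (pvRel_fold _ _ _)
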